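-- pv_equiv track=rewrite | github.com/elliotkarikari/Product_Weight_Project | shelfscale/matching/algorithm.py | _are_compatible_units
-- ===== SOURCE A (Python) =====
-- def _are_compatible_units(unit1: str, unit2: str) -> bool:
--     """
--     Check if two units are compatible
--
--     Args:
--         unit1: First unit
--         unit2: Second unit
--
--     Returns:
--         True if units are compatible
--     """
--     # Define compatible unit groups
--     compatible_groups = [
--         {'g', 'kg', 'mg'},                # Weight
--         {'ml', 'l'},                      # Volume (metric)
--         {'oz', 'lb'},                     # Weight (imperial)
--         {'cup', 'tbsp', 'tsp'},           # Volume (cooking)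
--         {'piece'}                         # Count
--     ]
--
--     for group in compatible_groups:
--         if unit1 in group and unit2 in group:
--             return True
--
--     return False
-- ===== SOURCE B (Python) =====
-- # Precompute the compatibility relation itself: every ordered pair (u, v) with u, v
-- # in the same group. A call is then one membership test on the pair.
-- _COMPATIBLE_PAIRS = frozenset(
--     (u, v)
--     for group in ({'g', 'kg', 'mg'},
--                   {'ml', 'l'},
--                   {'oz', 'lb'},
--                   {'cup', 'tbsp', 'tsp'},
--                   {'piece'})
--     for u in group
--     for v in group
-- )
--
--
-- def _are_compatible_units(unit1: str, unit2: str) -> bool: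
--     """Check if two units are compatible (same compatibility group)."""
--     return (unit1, unit2) in _COMPATIBLE_PAIRS
-- ===== Notes on version B (the rewrite author's own statement) =====
-- stated objective: alternative
-- what changed: Instead of scanning the list of groups testing both units against each, B materialises the compatibility relation itself once (the set of all same-group ordered pairs) and answers each call by a single membership test of the tuple (unit1, unit2); no group structure exists at call time.
import Mathlib
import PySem

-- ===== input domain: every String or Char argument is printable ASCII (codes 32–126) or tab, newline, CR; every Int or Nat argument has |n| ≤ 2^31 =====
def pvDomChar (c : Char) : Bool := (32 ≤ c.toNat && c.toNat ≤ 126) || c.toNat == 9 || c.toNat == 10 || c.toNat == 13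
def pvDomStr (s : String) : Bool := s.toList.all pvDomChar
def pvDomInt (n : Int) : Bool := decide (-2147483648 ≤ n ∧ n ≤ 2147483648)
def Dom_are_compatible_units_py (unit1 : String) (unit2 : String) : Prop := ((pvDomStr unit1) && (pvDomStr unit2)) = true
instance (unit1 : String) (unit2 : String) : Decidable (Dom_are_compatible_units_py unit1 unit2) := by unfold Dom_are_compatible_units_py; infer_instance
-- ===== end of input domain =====

-- B precomputes the compatibility relation (all same-group ordered pairs) once and answers
-- each call by one pair-membership test; objective: alternative decomposition, no group scan.


-- ===== PORT A =====
-- compatible_groups, a list of set literals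
def pvCompatibleGroups : List (PySem.Set String) :=
  [PySem.Set.ofList ["g", "kg", "mg"],
   PySem.Set.ofList ["ml", "l"],
   PySem.Set.ofList ["oz", "lb"],
   PySem.Set.ofList ["cup", "tbsp", "tsp"],
   PySem.Set.ofList ["piece"]]

-- the 'for group in compatible_groups' loop: return True on the first group containing both
def pvGroupLoop (unit1 : String) (unit2 : String) : List (PySem.Set String) → Bool
  | [] => false
  | g :: rest =>
      if PySem.Set.contains g unit1 && PySem.Set.contains g unit2 then true
      else pvGroupLoop unit1 unit2 rest

def are_compatible_units_py (unit1 : String) (unit2 : String) : Bool :=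
  pvGroupLoop unit1 unit2 pvCompatibleGroups

-- ===== PORT B =====
-- _COMPATIBLE_PAIRS: the comprehension over groups, then u in group, then v in group,
-- collected into a set of pairs (result is membership-only, so set order is irrelevant)
def pvCompatiblePairs : PySem.Set (String × String) :=
  PySem.Set.ofList
    (([["g", "kg", "mg"], ["ml", "l"], ["oz", "lb"], ["cup", "tbsp", "tsp"], ["piece"]] :
        List (List String)).flatMap fun group =>
      group.flatMap fun u => group.map fun v => (u, v))

def are_compatible_units_py_alt (unit1 : String) (unit2 : String) : Bool :=
  PySem.Set.contains pvCompatiblePairs (unit1, unit2)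

-- ===== PRECONDITION & SPEC =====
def Spec_are_compatible_units_py (unit1 : String) (unit2 : String) (out : Bool) : Prop := out = are_compatible_units_py_alt unit1 unit2
instance (unit1 : String) (unit2 : String) (out : Bool) : Decidable (Spec_are_compatible_units_py unit1 unit2 out) := by unfold Spec_are_compatible_units_py; infer_instance

-- ===== CLAIM (what is proved, stated in full; the proofs are below) =====
def Claim_equal_are_compatible_units_py : Prop := ∀ (unit1 : String) (unit2 : String), Dom_are_compatible_units_py unit1 unit2 → Spec_are_compatible_units_py unit1 unit2 (are_compatible_units_py unit1 unit2)

-- ===== LEMMAS AND PROOFS =====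

-- every string is one of the 11 known units, or none of them
theorem pvUnitCases (u : String) :
    u = "g" ∨ u = "kg" ∨ u = "mg" ∨ u = "ml" ∨ u = "l" ∨ u = "oz" ∨ u = "lb" ∨
    u = "cup" ∨ u = "tbsp" ∨ u = "tsp" ∨ u = "piece" ∨
    (u ≠ "g" ∧ u ≠ "kg" ∧ u ≠ "mg" ∧ u ≠ "ml" ∧ u ≠ "l" ∧ u ≠ "oz" ∧ u ≠ "lb" ∧
     u ≠ "cup" ∧ u ≠ "tbsp" ∧ u ≠ "tsp" ∧ u ≠ "piece") := by
  tauto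

-- the comprehension's set, evaluated once to its literal pair list
theorem pvPairsEval : pvCompatiblePairs =
    [("g", "g"), ("g", "kg"), ("g", "mg"), ("kg", "g"), ("kg", "kg"), ("kg", "mg"),
     ("mg", "g"), ("mg", "kg"), ("mg", "mg"), ("ml", "ml"), ("ml", "l"), ("l", "ml"),
     ("l", "l"), ("oz", "oz"), ("oz", "lb"), ("lb", "oz"), ("lb", "lb"), ("cup", "cup"),
     ("cup", "tbsp"), ("cup", "tsp"), ("tbsp", "cup"), ("tbsp", "tbsp"), ("tbsp", "tsp"),
     ("tsp", "cup"), ("tsp", "tbsp"), ("tsp", "tsp"), ("piece", "piece")] := by decide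

-- ===== VERDICT (by name: the statement is the Claim_ definition above) =====
theorem are_compatible_units_py_spec : Claim_equal_are_compatible_units_py := by
  intro u1 u2 _
  show are_compatible_units_py u1 u2 = are_compatible_units_py_alt u1 u2
  rcases pvUnitCases u1 with h1|h1|h1|h1|h1|h1|h1|h1|h1|h1|h1|⟨a1,a2,a3,a4,a5,a6,a7,a8,a9,a10,a11⟩ <;>
    rcases pvUnitCases u2 with h2|h2|h2|h2|h2|h2|h2|h2|h2|h2|h2|⟨b1,b2,b3,b4,b5,b6,b7,b8,b9,b10,b11⟩ <;>
    first
      | (subst_vars; decide)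
      | simp_all [are_compatible_units_py, are_compatible_units_py_alt, pvGroupLoop,
          pvCompatibleGroups, pvPairsEval, PySem.Set.contains, PySem.Set.ofList,
          PySem.Set.add, Prod.ext_iff]
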